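-- pv_equiv track=rewrite | github.com/olDox0/olDox222_RN | engine/web/web_server.py | _parse_search_decision
-- ===== SOURCE A (Python) =====
-- def _parse_search_decision(text: str) -> str | None:
--     """Parse defensivo da resposta de decisão.
--
--     OSL-5.1: nunca levanta exceção — retorna None em caso de dúvida.
--     """
--     if not text:
--         return None
--     normalized = text.strip().lower()
--     # Aceitar as traduções prováveis do Qwen:
--     for prefix in ("search:", "busca:", "pesquisar:", "buscar:", "pesquisa:"):
--         if normalized.startswith(prefix):
--             term = text.strip()[len(prefix):].strip()
--             if not term or len(term.split()) > 5:
--                 return None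
--             return term
--     return None
-- ===== SOURCE B (Python) =====
-- _KEYWORDS = {"search", "busca", "pesquisar", "buscar", "pesquisa"}
--
-- def _parse_search_decision(text: str) -> str | None:
--     head, sep, tail = text.strip().partition(":")
--     if not sep or head.lower() not in _KEYWORDS:
--         return None
--     term = tail.strip()
--     if not term or len(term.split()) > 5:
--         return None
--     return term
-- ===== Notes on version B (the rewrite author's own statement) =====
-- stated objective: simpler
-- what changed: A's loop of startswith tests over five colon-terminated prefixes is replaced by a single partition at the first colon plus one set-membership test on the lowercased head.
import Mathlib
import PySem

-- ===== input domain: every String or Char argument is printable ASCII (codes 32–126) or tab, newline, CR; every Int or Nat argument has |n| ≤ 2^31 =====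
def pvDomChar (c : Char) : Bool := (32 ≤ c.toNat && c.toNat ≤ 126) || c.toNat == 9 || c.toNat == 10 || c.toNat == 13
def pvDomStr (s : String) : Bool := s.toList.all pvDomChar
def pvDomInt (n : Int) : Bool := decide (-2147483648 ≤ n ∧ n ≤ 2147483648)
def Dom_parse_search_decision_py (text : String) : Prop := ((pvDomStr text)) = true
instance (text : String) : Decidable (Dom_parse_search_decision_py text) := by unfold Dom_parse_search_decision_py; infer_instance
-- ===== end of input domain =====

-- B replaces A's loop of startswith-tests over five recognised prefixes by a single split at the
-- first colon (str.partition) plus one set-membership test on the lowercased head; objective: simpler.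

-- ===== PORT A =====
-- A's prefix tuple, in A's order
def pvPrefixesA : List (List Char) :=
  ["search:".toList, "busca:".toList, "pesquisar:".toList, "buscar:".toList, "pesquisa:".toList]

-- the 'for prefix in (...)' loop of A (early return inside the loop)
def pvLoopA (stripped normalized : List Char) : List (List Char) → Option String
  | [] => none
  | p :: ps =>
    if PySem.Chars.startswith normalized p then
      let term := PySem.Chars.strip (PySem.List.slice stripped (some (p.length : Int)) none)
      if term = [] ∨ 5 < (PySem.Chars.split₀ term).length then none
      else some (String.ofList term)
    else pvLoopA stripped normalized ps

def parse_search_decision_py (text : String) : Option String :=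
  if text.toList = [] then none
  else
    let stripped := PySem.Chars.strip text.toList
    let normalized := PySem.Chars.lower stripped
    pvLoopA stripped normalized pvPrefixesA

-- ===== PORT B =====
-- Source B's keyword set (PySem.Set, all elements distinct)
def pvKeywords : PySem.Set (List Char) :=
  PySem.Set.ofList ["search".toList, "busca".toList, "pesquisar".toList, "buscar".toList, "pesquisa".toList]

-- Source B's body on the stripped text; str.partition(":") is ported by hand via the first-colon
-- index (exact: partition splits at the FIRST occurrence; sep is empty iff there is none)
def pvCheckStripped (s : List Char) : Option String :=
  let i := PySem.Chars.find s [':']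
  if i = -1 then none
  else if PySem.Set.contains pvKeywords (PySem.Chars.lower (s.take i.toNat)) then
    let term := PySem.Chars.strip (s.drop (i.toNat + 1))
    if term = [] ∨ 5 < (PySem.Chars.split₀ term).length then none
    else some (String.ofList term)
  else none

def parse_search_decision_py_alt (text : String) : Option String :=
  pvCheckStripped (PySem.Chars.strip text.toList)

-- ===== PRECONDITION & SPEC =====
def Spec_parse_search_decision_py (text : String) (out : Option String) : Prop := out = parse_search_decision_py_alt text
instance (text : String) (out : Option String) : Decidable (Spec_parse_search_decision_py text out) := by unfold Spec_parse_search_decision_py; infer_instance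

-- ===== CLAIM (what is proved, stated in full; the proofs are below) =====
def Claim_equal_parse_search_decision_py : Prop := ∀ (text : String), Dom_parse_search_decision_py text → Spec_parse_search_decision_py text (parse_search_decision_py text)

-- ===== LEMMAS AND PROOFS =====

-- lowering a character yields ':' only for ':' itself
theorem pv_lowerChar_eq_colon_iff (c : Char) : PySem.Chars.lowerChar c = ':' ↔ c = ':' := by
  unfold PySem.Chars.lowerChar PySem.Chars.isupper
  split_ifs with h
  · simp only [Bool.and_eq_true, decide_eq_true_eq] at h
    have h1 : 65 ≤ c.toNat := Nat.succ_le_of_lt h.1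
    have h2 : c.toNat ≤ 90 := h.2
    constructor
    · intro he
      have h3 : (Char.ofNat (c.toNat + 32)).toNat = (':' : Char).toNat := by rw [he]
      rw [Char.toNat_ofNat, if_pos (Or.inl (by omega) : Nat.isValidChar (c.toNat + 32))] at h3
      exfalso
      have h4 : (':' : Char).toNat = 58 := rfl
      omega
    · intro he; subst he; exfalso; revert h; decide
  · simp

theorem pv_colon_mem_lower_iff (s : List Char) : ':' ∈ PySem.Chars.lower s ↔ ':' ∈ s := by
  simp only [PySem.Chars.lower, List.mem_map]
  constructor
  · rintro ⟨c, hc, he⟩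
    rwa [(pv_lowerChar_eq_colon_iff c).mp he] at hc
  · intro h
    exact ⟨':', h, rfl⟩

theorem pv_singleton_prefix_iff (a : Char) (l : List Char) : [a] <+: l ↔ l.head? = some a := by
  constructor
  · rintro ⟨t, rfl⟩; rfl
  · intro h
    cases l with
    | nil => simp at h
    | cons x t => simp at h; subst h; exact ⟨t, rfl⟩

-- no colon in s: none of A's prefixes (each ending in a colon) can match the lowercased s
theorem pv_sw_none (s kw : List Char) (hnone : ':' ∉ s) :
    PySem.Chars.startswith (PySem.Chars.lower s) (kw ++ [':']) = false := by
  rw [Bool.eq_false_iff]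
  intro h
  rw [PySem.Chars.startswith_iff] at h
  exact hnone ((pv_colon_mem_lower_iff s).mp (h.subset (by simp)))

-- first colon of s at position k: a recognised prefix matches the lowercased s
-- iff the keyword is exactly the lowercased head before that colon
theorem pv_sw_iff (s kw : List Char) (hk : ':' ∉ kw) (k : Nat)
    (hcol : s[k]? = some ':') (hbef : ∀ j, j < k → s[j]? ≠ some ':') :
    (PySem.Chars.startswith (PySem.Chars.lower s) (kw ++ [':']) = true) ↔
      PySem.Chars.lower (s.take k) = kw := by
  have hks : k < s.length := by
    have := List.getElem?_eq_some_iff.mp hcol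
    exact this.1
  rw [PySem.Chars.startswith_iff]
  constructor
  · intro hp
    set m := kw.length with hm
    have htake : kw ++ [':'] = (PySem.Chars.lower s).take (m + 1) := by
      have := List.prefix_iff_eq_take.mp hp
      simpa using this
    have hgm : (PySem.Chars.lower s)[m]? = some ':' := by
      have h1 : ((PySem.Chars.lower s).take (m + 1))[m]? = some ':' := by
        rw [← htake]
        simp [hm]
      rwa [List.getElem?_take_of_lt (by omega)] at h1
    have hsm : s[m]? = some ':' := by
      simp only [PySem.Chars.lower, List.getElem?_map] at hgm
      cases he : s[m]? with
      | none => rw [he] at hgm; simp at hgm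
      | some c =>
        rw [he] at hgm
        simp only [Option.map_some, Option.some.injEq] at hgm
        exact congrArg some ((pv_lowerChar_eq_colon_iff c).mp hgm)
    rcases Nat.lt_trichotomy m k with hlt | heq | hgt
    · exact absurd hsm (hbef m hlt)
    · subst heq
      have h2 : (kw ++ [':']).take m = kw := by
        rw [List.take_append_of_le_length (by simp [hm])]
        simp [hm]
      rw [htake, List.take_take, min_eq_left (by omega)] at h2
      rw [← h2]
      simp [PySem.Chars.lower, List.map_take]
    · -- k < m: then kw would contain ':' at position k
      exfalso
      have h3 : (kw ++ [':'])[k]? = some ':' := by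
        rw [htake, List.getElem?_take_of_lt (by omega)]
        simp only [PySem.Chars.lower, List.getElem?_map, hcol]
        rfl
      rw [List.getElem?_append_left (by omega)] at h3
      exact hk (List.mem_of_getElem? h3)
  · intro he
    have hlen : kw.length = k := by
      have := congrArg List.length he
      simp only [PySem.Chars.lower, List.length_map, List.length_take] at this
      omega
    rw [List.prefix_iff_eq_take]
    have hts : (PySem.Chars.lower s).take (k + 1) = (PySem.Chars.lower s).take k ++ [':'] := by
      rw [List.take_add_one]
      congr 1
      simp only [PySem.Chars.lower, List.getElem?_map, hcol]
      rfl
    have htk : (PySem.Chars.lower s).take k = kw := by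
      rw [← he]
      simp [PySem.Chars.lower, List.map_take]
    simp [hlen, hts, htk]

-- the central fact: A's prefix loop on (stripped, lower stripped) computes B's partition check
theorem pv_main (s : List Char) :
    pvLoopA s (PySem.Chars.lower s) pvPrefixesA = pvCheckStripped s := by
  by_cases hfind : PySem.Chars.find s [':'] = -1
  · have hni : ':' ∉ s := by
      intro hc
      exact (PySem.Chars.find_eq_neg_one_iff s [':']).mp hfind
        ((List.singleton_infix_iff ':' s).mpr hc)
    have h1 : PySem.Chars.startswith (PySem.Chars.lower s) ['s', 'e', 'a', 'r', 'c', 'h', ':'] = false :=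
      pv_sw_none s ['s', 'e', 'a', 'r', 'c', 'h'] hni
    have h2 : PySem.Chars.startswith (PySem.Chars.lower s) ['b', 'u', 's', 'c', 'a', ':'] = false :=
      pv_sw_none s ['b', 'u', 's', 'c', 'a'] hni
    have h3 : PySem.Chars.startswith (PySem.Chars.lower s) ['p', 'e', 's', 'q', 'u', 'i', 's', 'a', 'r', ':'] = false :=
      pv_sw_none s ['p', 'e', 's', 'q', 'u', 'i', 's', 'a', 'r'] hni
    have h4 : PySem.Chars.startswith (PySem.Chars.lower s) ['b', 'u', 's', 'c', 'a', 'r', ':'] = false :=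
      pv_sw_none s ['b', 'u', 's', 'c', 'a', 'r'] hni
    have h5 : PySem.Chars.startswith (PySem.Chars.lower s) ['p', 'e', 's', 'q', 'u', 'i', 's', 'a', ':'] = false :=
      pv_sw_none s ['p', 'e', 's', 'q', 'u', 'i', 's', 'a'] hni
    simp [pvLoopA, pvPrefixesA, pvCheckStripped, hfind, h1, h2, h3, h4, h5]
  · have h0 : 0 ≤ PySem.Chars.find s [':'] := by
      have := PySem.Chars.neg_one_le_find s [':']
      omega
    obtain ⟨hpre, hmin⟩ := PySem.Chars.find_spec h0
    set k := (PySem.Chars.find s [':']).toNat with hkdef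
    have hcol : s[k]? = some ':' := by
      rw [← List.head?_drop]
      exact (pv_singleton_prefix_iff ':' (s.drop k)).mp hpre
    have hbef : ∀ j, j < k → s[j]? ≠ some ':' := by
      intro j hj he
      exact hmin j hj ((pv_singleton_prefix_iff ':' (s.drop j)).mpr (by rw [List.head?_drop]; exact he))
    have hks : k < s.length := (List.getElem?_eq_some_iff.mp hcol).1
    have hs1 := pv_sw_iff s "search".toList (by decide) k hcol hbef
    have hs2 := pv_sw_iff s "busca".toList (by decide) k hcol hbef
    have hs3 := pv_sw_iff s "pesquisar".toList (by decide) k hcol hbef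
    have hs4 := pv_sw_iff s "buscar".toList (by decide) k hcol hbef
    have hs5 := pv_sw_iff s "pesquisa".toList (by decide) k hcol hbef
    have hlow : ∀ kw : List Char, PySem.Chars.lower (s.take k) = kw → kw.length = k := by
      intro kw hkw
      have h := congrArg List.length hkw
      simp only [PySem.Chars.lower, List.length_map, List.length_take] at h
      omega
    by_cases m1 : PySem.Chars.lower (s.take k) = ['s', 'e', 'a', 'r', 'c', 'h']
    · have hkl : k = 6 := by
        have h := hlow _ m1
        simp at h
        omega
      have hT : PySem.Chars.startswith (PySem.Chars.lower s) ['s', 'e', 'a', 'r', 'c', 'h', ':'] = true := hs1.mpr m1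
      rw [hkl] at m1
      simp [pvLoopA, pvPrefixesA, pvCheckStripped, hfind, hT, m1, pvKeywords, PySem.Set.mem_ofList, ← hkdef, hkl,
        PySem.List.slice_from]
    by_cases m2 : PySem.Chars.lower (s.take k) = ['b', 'u', 's', 'c', 'a']
    · have hkl : k = 5 := by
        have h := hlow _ m2
        simp at h
        omega
      have hT : PySem.Chars.startswith (PySem.Chars.lower s) ['b', 'u', 's', 'c', 'a', ':'] = true := hs2.mpr m2
      rw [hkl] at m2
      have hF1 : PySem.Chars.startswith (PySem.Chars.lower s) ['s', 'e', 'a', 'r', 'c', 'h', ':'] = false := by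
        rw [Bool.eq_false_iff]
        intro h
        exact m1 (hs1.mp h)
      simp [pvLoopA, pvPrefixesA, pvCheckStripped, hfind, hT, m2, pvKeywords, PySem.Set.mem_ofList, ← hkdef, hkl,
        PySem.List.slice_from, hF1]
    by_cases m3 : PySem.Chars.lower (s.take k) = ['p', 'e', 's', 'q', 'u', 'i', 's', 'a', 'r']
    · have hkl : k = 9 := by
        have h := hlow _ m3
        simp at h
        omega
      have hT : PySem.Chars.startswith (PySem.Chars.lower s) ['p', 'e', 's', 'q', 'u', 'i', 's', 'a', 'r', ':'] = true := hs3.mpr m3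
      rw [hkl] at m3
      have hF1 : PySem.Chars.startswith (PySem.Chars.lower s) ['s', 'e', 'a', 'r', 'c', 'h', ':'] = false := by
        rw [Bool.eq_false_iff]
        intro h
        exact m1 (hs1.mp h)
      have hF2 : PySem.Chars.startswith (PySem.Chars.lower s) ['b', 'u', 's', 'c', 'a', ':'] = false := by
        rw [Bool.eq_false_iff]
        intro h
        exact m2 (hs2.mp h)
      simp [pvLoopA, pvPrefixesA, pvCheckStripped, hfind, hT, m3, pvKeywords, PySem.Set.mem_ofList, ← hkdef, hkl,
        PySem.List.slice_from, hF1, hF2]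
    by_cases m4 : PySem.Chars.lower (s.take k) = ['b', 'u', 's', 'c', 'a', 'r']
    · have hkl : k = 6 := by
        have h := hlow _ m4
        simp at h
        omega
      have hT : PySem.Chars.startswith (PySem.Chars.lower s) ['b', 'u', 's', 'c', 'a', 'r', ':'] = true := hs4.mpr m4
      rw [hkl] at m4
      have hF1 : PySem.Chars.startswith (PySem.Chars.lower s) ['s', 'e', 'a', 'r', 'c', 'h', ':'] = false := by
        rw [Bool.eq_false_iff]
        intro h
        exact m1 (hs1.mp h)
      have hF2 : PySem.Chars.startswith (PySem.Chars.lower s) ['b', 'u', 's', 'c', 'a', ':'] = false := by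
        rw [Bool.eq_false_iff]
        intro h
        exact m2 (hs2.mp h)
      have hF3 : PySem.Chars.startswith (PySem.Chars.lower s) ['p', 'e', 's', 'q', 'u', 'i', 's', 'a', 'r', ':'] = false := by
        rw [Bool.eq_false_iff]
        intro h
        exact m3 (hs3.mp h)
      simp [pvLoopA, pvPrefixesA, pvCheckStripped, hfind, hT, m4, pvKeywords, PySem.Set.mem_ofList, ← hkdef, hkl,
        PySem.List.slice_from, hF1, hF2, hF3]
    by_cases m5 : PySem.Chars.lower (s.take k) = ['p', 'e', 's', 'q', 'u', 'i', 's', 'a']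
    · have hkl : k = 8 := by
        have h := hlow _ m5
        simp at h
        omega
      have hT : PySem.Chars.startswith (PySem.Chars.lower s) ['p', 'e', 's', 'q', 'u', 'i', 's', 'a', ':'] = true := hs5.mpr m5
      rw [hkl] at m5
      have hF1 : PySem.Chars.startswith (PySem.Chars.lower s) ['s', 'e', 'a', 'r', 'c', 'h', ':'] = false := by
        rw [Bool.eq_false_iff]
        intro h
        exact m1 (hs1.mp h)
      have hF2 : PySem.Chars.startswith (PySem.Chars.lower s) ['b', 'u', 's', 'c', 'a', ':'] = false := by
        rw [Bool.eq_false_iff]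
        intro h
        exact m2 (hs2.mp h)
      have hF3 : PySem.Chars.startswith (PySem.Chars.lower s) ['p', 'e', 's', 'q', 'u', 'i', 's', 'a', 'r', ':'] = false := by
        rw [Bool.eq_false_iff]
        intro h
        exact m3 (hs3.mp h)
      have hF4 : PySem.Chars.startswith (PySem.Chars.lower s) ['b', 'u', 's', 'c', 'a', 'r', ':'] = false := by
        rw [Bool.eq_false_iff]
        intro h
        exact m4 (hs4.mp h)
      simp [pvLoopA, pvPrefixesA, pvCheckStripped, hfind, hT, m5, pvKeywords, PySem.Set.mem_ofList, ← hkdef, hkl,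
        PySem.List.slice_from, hF1, hF2, hF3, hF4]
    have hF1 : PySem.Chars.startswith (PySem.Chars.lower s) ['s', 'e', 'a', 'r', 'c', 'h', ':'] = false := by
      rw [Bool.eq_false_iff]
      intro h
      exact m1 (hs1.mp h)
    have hF2 : PySem.Chars.startswith (PySem.Chars.lower s) ['b', 'u', 's', 'c', 'a', ':'] = false := by
      rw [Bool.eq_false_iff]
      intro h
      exact m2 (hs2.mp h)
    have hF3 : PySem.Chars.startswith (PySem.Chars.lower s) ['p', 'e', 's', 'q', 'u', 'i', 's', 'a', 'r', ':'] = false := by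
      rw [Bool.eq_false_iff]
      intro h
      exact m3 (hs3.mp h)
    have hF4 : PySem.Chars.startswith (PySem.Chars.lower s) ['b', 'u', 's', 'c', 'a', 'r', ':'] = false := by
      rw [Bool.eq_false_iff]
      intro h
      exact m4 (hs4.mp h)
    have hF5 : PySem.Chars.startswith (PySem.Chars.lower s) ['p', 'e', 's', 'q', 'u', 'i', 's', 'a', ':'] = false := by
      rw [Bool.eq_false_iff]
      intro h
      exact m5 (hs5.mp h)
    simp [pvLoopA, pvPrefixesA, pvCheckStripped, hfind, pvKeywords, PySem.Set.mem_ofList,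
      m1, m2, m3, m4, m5, ← hkdef, hF1, hF2, hF3, hF4, hF5]

-- ===== VERDICT (by name: the statement is the Claim_ definition above) =====
theorem parse_search_decision_py_spec : Claim_equal_parse_search_decision_py := by
  intro text _
  unfold Spec_parse_search_decision_py parse_search_decision_py parse_search_decision_py_alt
  by_cases h : text.toList = []
  · rw [if_pos h, h]
    rfl
  · rw [if_neg h]
    exact pv_main (PySem.Chars.strip text.toList)
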